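-- pv_equiv track=rewrite | github.com/farodoc/Algorithms-and-Data-Structures-AGH-UST | Random tasks/Even more random/2022_zadB2.py | szukanieKwadratu
-- ===== SOURCE A (Python) =====
-- def czy2czynniki(liczba):
--     if liczba == 1:
--         return False
--
--     pierwszyCzynnik = False
--     cnt = 0
--
--     i = 2
--
--     while liczba > 1:
--         if liczba % i == 0:
--             if pierwszyCzynnik == False:
--                 cnt += 1
--                 prev = i
--                 pierwszyCzynnik = True
--
--             if i != prev:
--                 cnt += 1
--                 prev = i
--
--             liczba //= i
--
--         else:
--             i += 1
--
--     if cnt == 2: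
--         return True
--
--     return False
--
-- def condition(t, row, col, bok):
--     n = len(t[0])
--
--     if row + bok - 1 < n and col + bok - 1 < n:
--         iloczyn = t[row][col] * t[row + bok - 1][col] * t[row + bok - 1][col + bok - 1] * t[row][col + bok - 1]
--
--         if czy2czynniki(iloczyn):
--             return bok
--
--     return False
--
-- def szukanieKwadratu(t):
--     n = len(t[0])
--
--     for bok in range(2, n):
--         for i in range(n - bok + 1):
--             for j in range(n - bok + 1):
--                 if condition(t,i,j,bok) != False:
--                     return condition(t,i,j,bok)
--
--     return 0
-- ===== SOURCE B (Python) =====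
-- def _omega(m):
--     # number of distinct prime factors of m (m > 1), trial division up to sqrt(m)
--     cnt = 0
--     d = 2
--     while d * d <= m:
--         if m % d == 0:
--             cnt += 1
--             while m % d == 0:
--                 m //= d
--         d += 1
--     if m > 1:
--         cnt += 1
--     return cnt
--
-- def szukanieKwadratu(t):
--     n = len(t[0])
--     for bok in range(2, n):
--         for i in range(n - bok + 1):
--             for j in range(n - bok + 1):
--                 p = t[i][j] * t[i + bok - 1][j] * t[i + bok - 1][j + bok - 1] * t[i][j + bok - 1]
--                 if p > 1 and _omega(p) == 2:
--                     return bok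
--     return 0
-- ===== Notes on version B (the rewrite author's own statement) =====
-- stated objective: alternative
-- what changed: The factor test now trial-divides only up to the square root of the corner product (dividing each found divisor out completely and counting the leftover prime, instead of A's scan that increments the trial divisor one by one up to the largest prime factor), and the corner product and its test are computed once per square instead of calling condition twice.
-- outside the precondition, e.g. on szukanieKwadratu([[4, 5, 0], [5, 1, 0], [7, 7]]): A returns 2, B returns 2
import Mathlib
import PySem

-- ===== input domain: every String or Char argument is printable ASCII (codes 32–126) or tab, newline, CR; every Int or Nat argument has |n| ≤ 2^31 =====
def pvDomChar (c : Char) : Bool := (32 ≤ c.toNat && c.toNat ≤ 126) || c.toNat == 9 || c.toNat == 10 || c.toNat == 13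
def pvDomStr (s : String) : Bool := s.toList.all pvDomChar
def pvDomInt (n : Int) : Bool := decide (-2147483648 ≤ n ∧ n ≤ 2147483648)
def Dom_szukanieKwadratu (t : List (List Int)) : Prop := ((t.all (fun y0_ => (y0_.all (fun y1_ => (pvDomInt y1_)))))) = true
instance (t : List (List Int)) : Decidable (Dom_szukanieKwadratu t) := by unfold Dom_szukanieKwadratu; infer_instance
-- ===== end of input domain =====

-- B replaces A's one-divisor-at-a-time factor scan (which tries every i up to the largest prime
-- factor of the corner product) by trial division up to √value, dividing each found divisor out
-- completely, and evaluates the corner product and its test once per square instead of calling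
-- `condition` twice; objective: alternative (the square scan itself is unchanged and dominates).

-- ===== PORT A =====
-- while-loop of czy2czynniki, written with a fuel parameter that only makes the recursion
-- structural; the caller passes fuel strictly larger than the number of iterations the Python
-- loop performs (each iteration either divides liczba by i ≥ 2 or increments i ≤ liczba, so
-- liczba.toNat + (liczba - i).toNat + 1 is enough), so the fuel-0 branch is never reached and the
-- loop guard is exactly Python's `liczba > 1`; the two sequential in-place `if` updates of
-- cnt/prev/pierwszyCzynnik are written out as the three possible cases.
def czyLoopA (fuel : Nat) (liczba i cnt prev : Int) (pierwszy : Bool) : Int :=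
  match fuel with
  | 0 => cnt
  | f + 1 =>
    if 1 < liczba then
      if PySem.Int.mod liczba i = 0 then
        if pierwszy = false then
          czyLoopA f (PySem.Int.floordiv liczba i) i (cnt + 1) i true
        else if i ≠ prev then
          czyLoopA f (PySem.Int.floordiv liczba i) i (cnt + 1) i true
        else
          czyLoopA f (PySem.Int.floordiv liczba i) i cnt prev true
      else
        czyLoopA f liczba (i + 1) cnt prev pierwszy
    else cnt

def czy2czynnikiA (liczba : Int) : Bool :=
  if liczba = 1 then false
  else decide (czyLoopA (liczba.toNat + (liczba - 2).toNat + 1) liczba 2 0 0 false = 2)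

def conditionA (t : List (List Int)) (row col bok : Int) : Option Int :=
  let n : Int := (t.headI.length : Int)   -- len(t[0]); t ≠ [] under Pre_
  if row + bok - 1 < n ∧ col + bok - 1 < n then
    let iloczyn :=
      PySem.List.pyGetD (PySem.List.pyGetD t row []) col 0 *
      PySem.List.pyGetD (PySem.List.pyGetD t (row + bok - 1) []) col 0 *
      PySem.List.pyGetD (PySem.List.pyGetD t (row + bok - 1) []) (col + bok - 1) 0 *
      PySem.List.pyGetD (PySem.List.pyGetD t row []) (col + bok - 1) 0
    if czy2czynnikiA iloczyn then some bok else none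
  else none

-- `return condition(t,i,j,bok)` after `condition(t,i,j,bok) != False`: condition is pure, so the
-- doubled call returns the found value, i.e. the first `some` of the nested scans.
def szukanieKwadratu (t : List (List Int)) : Int :=
  let n : Int := (t.headI.length : Int)
  ((PySem.List.pyRange 2 n 1).findSome? fun bok =>
     (PySem.List.pyRange 0 (n - bok + 1) 1).findSome? fun i =>
       (PySem.List.pyRange 0 (n - bok + 1) 1).findSome? fun j =>
         conditionA t i j bok).getD 0

-- ===== PORT B =====
-- inner `while m % d == 0: m //= d` of _omega, with fuel (every division shrinks m, so m.toNat + 1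
-- iterations are enough and the fuel-0 branch is never reached); the guard is exactly Python's.
def divOutB (fuel : Nat) (m d : Int) : Int :=
  match fuel with
  | 0 => m
  | f + 1 =>
    if PySem.Int.mod m d = 0 then divOutB f (PySem.Int.floordiv m d) d else m

-- outer `while d * d <= m` of _omega, with fuel ((m - d).toNat + 1 iterations are enough since d
-- grows and m never does, so the fuel-0 branch is never reached); returns the final (m, cnt).
def omegaLoopB (fuel : Nat) (m d cnt : Int) : Int × Int :=
  match fuel with
  | 0 => (m, cnt)
  | f + 1 =>
    if d * d ≤ m then
      if PySem.Int.mod m d = 0 then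
        omegaLoopB f (divOutB (m.toNat + 1) m d) (d + 1) (cnt + 1)
      else omegaLoopB f m (d + 1) cnt
    else (m, cnt)

def omegaB (m : Int) : Int :=
  let r := omegaLoopB ((m - 2).toNat + 1) m 2 0
  if 1 < r.1 then r.2 + 1 else r.2

def szukanieKwadratu_alt (t : List (List Int)) : Int :=
  let n : Int := (t.headI.length : Int)
  ((PySem.List.pyRange 2 n 1).findSome? fun bok =>
     (PySem.List.pyRange 0 (n - bok + 1) 1).findSome? fun i =>
       (PySem.List.pyRange 0 (n - bok + 1) 1).findSome? fun j =>
         let p :=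
           PySem.List.pyGetD (PySem.List.pyGetD t i []) j 0 *
           PySem.List.pyGetD (PySem.List.pyGetD t (i + bok - 1) []) j 0 *
           PySem.List.pyGetD (PySem.List.pyGetD t (i + bok - 1) []) (j + bok - 1) 0 *
           PySem.List.pyGetD (PySem.List.pyGetD t i []) (j + bok - 1) 0
         if 1 < p ∧ omegaB p = 2 then some bok else none).getD 0

-- ===== PRECONDITION & SPEC =====
-- Pre_ excludes the empty list (len(t[0]) raises IndexError) and, when a search actually runs
-- (more than 2 columns), shapes without at least n = len(t[0]) rows of length ≥ n each among the
-- first n rows: on such ragged inputs A hits an IndexError unless an early return happens first,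
-- and whether it does depends on the values, which a closed-form Pre_ cannot express — so a few
-- early-returning ragged inputs are excluded although A (and B alike) returns there.
def Pre_szukanieKwadratu (t : List (List Int)) : Prop :=
  t ≠ [] ∧ (2 < t.headI.length →
    (t.headI.length ≤ t.length ∧ ∀ r ∈ t.take t.headI.length, t.headI.length ≤ r.length))
instance (t : List (List Int)) : Decidable (Pre_szukanieKwadratu t) := by
  unfold Pre_szukanieKwadratu; infer_instance

def pvWitness_szukanieKwadratu : List (List Int) := [[2, 3, 5], [7, 11, 13], [1, 1, 1]]

def Spec_szukanieKwadratu (t : List (List Int)) (out : Int) : Prop := out = szukanieKwadratu_alt t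
instance (t : List (List Int)) (out : Int) : Decidable (Spec_szukanieKwadratu t out) := by unfold Spec_szukanieKwadratu; infer_instance

-- ===== CLAIM (what is proved, stated in full; the proofs are below) =====
def Claim_equal_szukanieKwadratu : Prop := ∀ (t : List (List Int)), Dom_szukanieKwadratu t → Pre_szukanieKwadratu t → Spec_szukanieKwadratu t (szukanieKwadratu t)

-- ===== LEMMAS AND PROOFS =====

lemma fd_natDiv (v i : Int) (hv : 0 ≤ v) (hi : 0 < i) :
    PySem.Int.floordiv v i = ((v.toNat / i.toNat : Nat) : Int) := by
  rw [PySem.Int.floordiv_eq_ediv_of_pos hi]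
  obtain ⟨a, rfl⟩ : ∃ a : Nat, v = (a : Int) := ⟨v.toNat, by omega⟩
  obtain ⟨b, rfl⟩ : ∃ b : Nat, i = (b : Int) := ⟨i.toNat, by omega⟩
  simp

lemma fd_toNat_lt (v i : Int) (hv : 1 < v) (hi : 2 ≤ i) :
    (PySem.Int.floordiv v i).toNat < v.toNat := by
  rw [fd_natDiv v i (by omega) (by omega), Int.toNat_natCast]
  exact Nat.div_lt_self (by omega) (by omega)

lemma int_dvd_toNat (k v : Int) (hk : 0 ≤ k) (hv : 0 ≤ v) : k ∣ v ↔ k.toNat ∣ v.toNat := by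
  obtain ⟨a, rfl⟩ : ∃ a : Nat, k = (a : Int) := ⟨k.toNat, by omega⟩
  obtain ⟨b, rfl⟩ : ∃ b : Nat, v = (b : Int) := ⟨v.toNat, by omega⟩
  simp [Int.natCast_dvd_natCast]

lemma fd_pos (v i : Int) (hv : 1 < v) (hi : 2 ≤ i) (hdvd : i ∣ v) :
    1 ≤ PySem.Int.floordiv v i := by
  rw [fd_natDiv v i (by omega) (by omega)]
  have hd : i.toNat ∣ v.toNat := (int_dvd_toNat i v (by omega) (by omega)).mp hdvd
  have h1 : i.toNat ≤ v.toNat := Nat.le_of_dvd (by omega) hd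
  have h2 := (Nat.one_le_div_iff (b := i.toNat) (by omega)).mpr h1
  exact_mod_cast h2

lemma fd_le (v i : Int) (hv : 0 ≤ v) (hi : 0 < i) : PySem.Int.floordiv v i ≤ v := by
  rw [fd_natDiv v i hv hi]
  have h := Nat.div_le_self v.toNat i.toNat
  omega

-- the least divisor ≥ 2 of a number > 1 is prime
lemma least_prime (a b : Nat) (ha : 1 < a) (hb : 2 ≤ b) (hdvd : b ∣ a)
    (hmin : ∀ k : Nat, 2 ≤ k → k < b → ¬ k ∣ a) : b.Prime := by
  have h1 : a.minFac ∣ a := Nat.minFac_dvd a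
  have hp : a.minFac.Prime := Nat.minFac_prime (by omega)
  have hle : a.minFac ≤ b := Nat.minFac_le_of_dvd hb hdvd
  have h2 : ¬ a.minFac < b := fun h => hmin _ hp.two_le h h1
  have h3 : a.minFac = b := by omega
  rwa [← h3]

lemma pf_div (a p : Nat) (hp : p.Prime) (hdvd : p ∣ a) (ha : 0 < a) :
    a.primeFactors = insert p ((a / p).primeFactors) := by
  have hq : a / p ≠ 0 := by
    have h1 : p ≤ a := Nat.le_of_dvd ha hdvd
    have := Nat.div_pos h1 hp.pos
    omega
  conv_lhs => rw [← Nat.div_mul_cancel hdvd]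
  rw [Nat.primeFactors_mul hq hp.ne_zero, hp.primeFactors, Finset.union_comm,
    Finset.singleton_union]

lemma card_pf_step (a p : Nat) (hp : p.Prime) (hdvd : p ∣ a) (ha : 1 < a) :
    a.primeFactors.card = ((a / p).primeFactors \ {p}).card + 1 := by
  rw [pf_div a p hp hdvd (by omega), Finset.sdiff_singleton_eq_erase]
  by_cases hmem : p ∈ (a / p).primeFactors
  · rw [Finset.insert_eq_self.mpr hmem]
    exact (Finset.card_erase_add_one hmem).symm
  · rw [Finset.card_insert_of_notMem hmem, Finset.erase_eq_of_notMem hmem]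

lemma sdiff_pf_step (a p : Nat) (hp : p.Prime) (hdvd : p ∣ a) (ha : 1 < a) :
    a.primeFactors \ {p} = (a / p).primeFactors \ {p} := by
  rw [pf_div a p hp hdvd (by omega)]
  exact Finset.insert_sdiff_of_mem _ (Finset.mem_singleton_self p)

lemma not_mem_pf_of_not_dvd (a p : Nat) (h : ¬ p ∣ a) : p ∉ a.primeFactors := by
  intro hmem
  exact h (Nat.mem_primeFactors.mp hmem).2.1

lemma fd_dvd (v i : Int) (hv : 1 < v) (hi : 2 ≤ i) (hdvd : i ∣ v) :
    PySem.Int.floordiv v i ∣ v := by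
  have hdN : i.toNat ∣ v.toNat := (int_dvd_toNat i v (by omega) (by omega)).mp hdvd
  rw [fd_natDiv v i (by omega) (by omega)]
  obtain ⟨c, hc⟩ := hdN
  have h1 : v.toNat / i.toNat = c := by rw [hc]; exact Nat.mul_div_cancel_left c (by omega)
  have h2 : c ∣ v.toNat := ⟨i.toNat, by rw [hc]; ring⟩
  have h3 : ((c : Nat) : Int) ∣ ((v.toNat : Nat) : Int) := Int.natCast_dvd_natCast.mpr h2
  have h4 : ((v.toNat : Nat) : Int) = v := by omega
  rw [h1]
  rwa [h4] at h3

lemma fd_toNat_div (v i : Int) (hv : 0 ≤ v) (hi : 0 < i) :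
    (PySem.Int.floordiv v i).toNat = v.toNat / i.toNat := by
  rw [fd_natDiv v i hv hi, Int.toNat_natCast]

-- A's loop counts the distinct prime factors of v not yet counted (prev is the last one counted)
lemma czyLoopA_spec (fuel : Nat) : ∀ (v i cnt prev : Int) (b : Bool),
    v.toNat + (v - i).toNat < fuel → 1 ≤ v → 2 ≤ i → (1 < v → i ≤ v) →
    (∀ k : Int, 2 ≤ k → k < i → ¬ k ∣ v) →
    (b = true → 2 ≤ prev ∧ prev ≤ i) →
    czyLoopA fuel v i cnt prev b
      = cnt + (((v.toNat.primeFactors \ (if b = true then {prev.toNat} else ∅)).card : Nat) : Int) := by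
  induction fuel with
  | zero =>
    intro v i cnt prev b hf h1
    exact absurd hf (by omega)
  | succ f ih =>
    intro v i cnt prev b hf h1 h2 h3 h4 h5
    show (if 1 < v then _ else cnt) = _
    by_cases hg : 1 < v
    · rw [if_pos hg]
      have hgi : i ≤ v := h3 hg
      by_cases hmod : PySem.Int.mod v i = 0
      · -- a division step: i is the least divisor, hence prime
        rw [if_pos hmod]
        have hdvd : i ∣ v := (PySem.Int.mod_eq_zero_iff_dvd v i).mp hmod
        have hdN : i.toNat ∣ v.toNat := (int_dvd_toNat i v (by omega) (by omega)).mp hdvd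
        have hminN : ∀ k : Nat, 2 ≤ k → k < i.toNat → ¬ k ∣ v.toNat := by
          intro k hk1 hk2 hk3
          exact h4 (k : Int) (by exact_mod_cast hk1) (by omega)
            ((int_dvd_toNat _ _ (by omega) (by omega)).mpr (by simpa using hk3))
        have hpN : (i.toNat).Prime := least_prime v.toNat i.toNat (by omega) (by omega) hdN hminN
        have hv'toNat : (PySem.Int.floordiv v i).toNat = v.toNat / i.toNat :=
          fd_toNat_div v i (by omega) (by omega)
        have hv'pos : 1 ≤ PySem.Int.floordiv v i := fd_pos v i hg h2 hdvd
        have hv'le : PySem.Int.floordiv v i ≤ v := fd_le v i (by omega) (by omega)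
        have hv'lt : (PySem.Int.floordiv v i).toNat < v.toNat := fd_toNat_lt v i hg h2
        have hv'dvd : PySem.Int.floordiv v i ∣ v := fd_dvd v i hg h2 hdvd
        have hf' : (PySem.Int.floordiv v i).toNat + (PySem.Int.floordiv v i - i).toNat < f := by
          omega
        have hmin' : ∀ k : Int, 2 ≤ k → k < i → ¬ k ∣ PySem.Int.floordiv v i :=
          fun k ha hb hc => h4 k ha hb (hc.trans hv'dvd)
        have hle' : 1 < PySem.Int.floordiv v i → i ≤ PySem.Int.floordiv v i := by
          intro hv'1
          by_contra hcon
          push_neg at hcon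
          have hq1 : ((PySem.Int.floordiv v i).toNat.minFac).Prime := Nat.minFac_prime (by omega)
          have hq2 := Nat.minFac_dvd (PySem.Int.floordiv v i).toNat
          have hq3 : (PySem.Int.floordiv v i).toNat.minFac ≤ (PySem.Int.floordiv v i).toNat :=
            Nat.minFac_le (by omega)
          have hq4 : (PySem.Int.floordiv v i).toNat.minFac ∣ v.toNat :=
            hq2.trans ((int_dvd_toNat (PySem.Int.floordiv v i) v (by omega) (by omega)).mp hv'dvd)
          exact hminN _ hq1.two_le (by omega) hq4
        have hcard := card_pf_step v.toNat i.toNat hpN hdN (by omega)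
        cases b with
        | false =>
          rw [if_pos rfl]
          rw [ih (PySem.Int.floordiv v i) i (cnt + 1) i true hf' hv'pos h2 hle' hmin'
            (fun _ => ⟨h2, le_refl i⟩)]
          rw [if_pos rfl, if_neg (by simp), Finset.sdiff_empty, hv'toNat]
          omega
        | true =>
          rw [if_neg (by simp)]
          by_cases hip : i = prev
          · rw [if_neg (fun hk => hk hip)]
            subst hip
            rw [ih (PySem.Int.floordiv v i) i cnt i true hf' hv'pos h2 hle' hmin'
              (fun _ => ⟨h2, le_refl i⟩)]
            rw [hv'toNat]
            simp only [reduceIte]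
            rw [sdiff_pf_step v.toNat i.toNat hpN hdN (by omega)]
          · rw [if_pos hip]
            rw [ih (PySem.Int.floordiv v i) i (cnt + 1) i true hf' hv'pos h2 hle' hmin'
              (fun _ => ⟨h2, le_refl i⟩)]
            have hprev := h5 rfl
            have hnd : ¬ prev.toNat ∣ v.toNat := by
              intro hdd
              exact h4 prev hprev.1 (by omega)
                ((int_dvd_toNat prev v (by omega) (by omega)).mpr hdd)
            have hps : v.toNat.primeFactors \ {prev.toNat} = v.toNat.primeFactors := by
              rw [Finset.sdiff_singleton_eq_erase]
              exact Finset.erase_eq_of_notMem (not_mem_pf_of_not_dvd _ _ hnd)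
            rw [hv'toNat]
            simp only [reduceIte]
            rw [hps]
            omega
      · -- i does not divide v: step i to i+1
        rw [if_neg hmod]
        have hndvd : ¬ i ∣ v := fun hd => hmod ((PySem.Int.mod_eq_zero_iff_dvd v i).mpr hd)
        have hne : i ≠ v := fun he => hndvd (he ▸ dvd_rfl)
        exact ih v (i + 1) cnt prev b (by omega) h1 (by omega) (fun _ => by omega)
          (fun k hk1 hk2 hk3 => by
            by_cases hki : k = i
            · exact hndvd (hki ▸ hk3)
            · exact h4 k hk1 (by omega) hk3)
          (fun hb => ⟨(h5 hb).1, by have := (h5 hb).2; omega⟩)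
    · rw [if_neg hg]
      have hv1 : v = 1 := by omega
      subst hv1
      simp

-- characterisation of czy2czynniki
lemma czyA_char (v : Int) :
    czy2czynnikiA v = true ↔ (1 < v ∧ v.toNat.primeFactors.card = 2) := by
  unfold czy2czynnikiA
  by_cases h1 : v = 1
  · subst h1; simp
  · rw [if_neg h1]
    by_cases h2 : 1 < v
    · rw [czyLoopA_spec (v.toNat + (v - 2).toNat + 1) v 2 0 0 false (by omega) (by omega)
        (by omega) (fun _ => by omega) (fun k hk1 hk2 => absurd hk1 (by omega)) (by simp)]
      simp only [if_neg (by simp : ¬ (false = true)), Finset.sdiff_empty]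
      simp [h2]
      omega
    · have hz : czyLoopA (v.toNat + (v - 2).toNat + 1) v 2 0 0 false = 0 := by
        show (if 1 < v then _ else (0 : Int)) = 0
        rw [if_neg h2]
      rw [hz]
      simp [h2]

lemma divOutB_le (fuel : Nat) : ∀ (m d : Int), 1 ≤ m → 2 ≤ d → divOutB fuel m d ≤ m := by
  induction fuel with
  | zero => intro m d _ _; exact le_refl m
  | succ f ih =>
    intro m d hm hd
    show (if PySem.Int.mod m d = 0 then _ else m) ≤ m
    by_cases hmod : PySem.Int.mod m d = 0
    · rw [if_pos hmod]
      have hdvd : d ∣ m := (PySem.Int.mod_eq_zero_iff_dvd m d).mp hmod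
      have hm2 : 1 < m := by
        have := Int.le_of_dvd (by omega) hdvd
        omega
      have h1 := ih (PySem.Int.floordiv m d) d (fd_pos m d hm2 hd hdvd) hd
      have h2 := fd_le m d (by omega) (by omega)
      omega
    · rw [if_neg hmod]

lemma divOutB_pos (fuel : Nat) : ∀ (m d : Int), 0 < m → 2 ≤ d → 0 < divOutB fuel m d := by
  induction fuel with
  | zero => intro m d hm _; exact hm
  | succ f ih =>
    intro m d hm hd
    show 0 < (if PySem.Int.mod m d = 0 then _ else m)
    by_cases hmod : PySem.Int.mod m d = 0
    · rw [if_pos hmod]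
      have hdvd : d ∣ m := (PySem.Int.mod_eq_zero_iff_dvd m d).mp hmod
      have hm2 : 1 < m := by
        have := Int.le_of_dvd (by omega) hdvd
        omega
      exact ih (PySem.Int.floordiv m d) d (by have := fd_pos m d hm2 hd hdvd; omega) hd
    · rw [if_neg hmod]; exact hm

lemma divOutB_dvd (fuel : Nat) : ∀ (m d : Int), 1 ≤ m → 2 ≤ d → divOutB fuel m d ∣ m := by
  induction fuel with
  | zero => intro m d _ _; exact dvd_refl m
  | succ f ih =>
    intro m d hm hd
    show (if PySem.Int.mod m d = 0 then _ else m) ∣ m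
    by_cases hmod : PySem.Int.mod m d = 0
    · rw [if_pos hmod]
      have hdvd : d ∣ m := (PySem.Int.mod_eq_zero_iff_dvd m d).mp hmod
      have hm2 : 1 < m := by
        have := Int.le_of_dvd (by omega) hdvd
        omega
      exact dvd_trans (ih (PySem.Int.floordiv m d) d (fd_pos m d hm2 hd hdvd) hd)
        (fd_dvd m d hm2 hd hdvd)
    · rw [if_neg hmod]
  
lemma divOutB_not_dvd (fuel : Nat) : ∀ (m d : Int), m.toNat < fuel → 1 ≤ m → 2 ≤ d →
    ¬ d ∣ divOutB fuel m d := by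
  induction fuel with
  | zero => intro m d hf hm _; exact absurd hf (by omega)
  | succ f ih =>
    intro m d hf hm hd
    show ¬ d ∣ (if PySem.Int.mod m d = 0 then _ else m)
    by_cases hmod : PySem.Int.mod m d = 0
    · rw [if_pos hmod]
      have hdvd : d ∣ m := (PySem.Int.mod_eq_zero_iff_dvd m d).mp hmod
      have hm2 : 1 < m := by
        have := Int.le_of_dvd (by omega) hdvd
        omega
      have hlt := fd_toNat_lt m d hm2 hd
      exact ih (PySem.Int.floordiv m d) d (by omega) (fd_pos m d hm2 hd hdvd) hd
    · rw [if_neg hmod]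
      exact fun hdvd => hmod ((PySem.Int.mod_eq_zero_iff_dvd m d).mpr hdvd)

lemma divOutB_pf (fuel : Nat) : ∀ (m d : Int), m.toNat < fuel → 1 ≤ m → 2 ≤ d →
    (d.toNat).Prime →
    (divOutB fuel m d).toNat.primeFactors = m.toNat.primeFactors \ {d.toNat} := by
  induction fuel with
  | zero => intro m d hf hm _ _; exact absurd hf (by omega)
  | succ f ih =>
    intro m d hf hm hd hp
    show (if PySem.Int.mod m d = 0 then _ else m).toNat.primeFactors = _
    by_cases hmod : PySem.Int.mod m d = 0
    · rw [if_pos hmod]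
      have hdvd : d ∣ m := (PySem.Int.mod_eq_zero_iff_dvd m d).mp hmod
      have hdN : d.toNat ∣ m.toNat := (int_dvd_toNat d m (by omega) (by omega)).mp hdvd
      have hm2 : 1 < m := by
        have := Int.le_of_dvd (by omega) hdvd
        omega
      have hlt := fd_toNat_lt m d hm2 hd
      rw [ih (PySem.Int.floordiv m d) d (by omega) (fd_pos m d hm2 hd hdvd) hd hp]
      rw [fd_toNat_div m d (by omega) (by omega)]
      rw [← sdiff_pf_step m.toNat d.toNat hp hdN (by omega)]
    · rw [if_neg hmod]
      have hnd : ¬ d.toNat ∣ m.toNat := by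
        intro hdd
        exact hmod ((PySem.Int.mod_eq_zero_iff_dvd m d).mpr
          ((int_dvd_toNat d m (by omega) (by omega)).mpr hdd))
      rw [Finset.sdiff_singleton_eq_erase,
        Finset.erase_eq_of_notMem (not_mem_pf_of_not_dvd _ _ hnd)]

lemma omegaLoopB_spec (fuel : Nat) : ∀ (m d cnt : Int), (m - d).toNat < fuel → 1 ≤ m → 2 ≤ d →
    (∀ k : Int, 2 ≤ k → k < d → ¬ k ∣ m) →
    (omegaLoopB fuel m d cnt).2 + (if 1 < (omegaLoopB fuel m d cnt).1 then (1 : Int) else 0)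
      = cnt + ((m.toNat.primeFactors.card : Nat) : Int) := by
  induction fuel with
  | zero =>
    intro m d cnt hf h1 h2 h4
    -- fuel 0 is only reached with (m - d).toNat < 0, impossible … but toNat is ≥ 0:
    exact absurd hf (by omega)
  | succ f ih =>
    intro m d cnt hf h1 h2 h4
    have hstep : omegaLoopB (f + 1) m d cnt =
        (if d * d ≤ m then
          (if PySem.Int.mod m d = 0 then
            omegaLoopB f (divOutB (m.toNat + 1) m d) (d + 1) (cnt + 1)
          else omegaLoopB f m (d + 1) cnt)
        else (m, cnt)) := rfl
    rw [hstep]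
    by_cases hg : d * d ≤ m
    · rw [if_pos hg]
      have hdm : d < m := by nlinarith [h2, hg]
      by_cases hmod : PySem.Int.mod m d = 0
      · rw [if_pos hmod]
        have hm1 : 1 < m := by nlinarith [h2, hg]
        have hdvd : d ∣ m := (PySem.Int.mod_eq_zero_iff_dvd m d).mp hmod
        have hdN : d.toNat ∣ m.toNat := (int_dvd_toNat d m (by omega) (by omega)).mp hdvd
        have hminN : ∀ k : Nat, 2 ≤ k → k < d.toNat → ¬ k ∣ m.toNat := by
          intro k hk1 hk2 hk3
          exact h4 (k : Int) (by exact_mod_cast hk1) (by omega)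
            ((int_dvd_toNat _ _ (by omega) (by omega)).mpr (by simpa using hk3))
        have hpN : (d.toNat).Prime := least_prime m.toNat d.toNat (by omega) (by omega) hdN hminN
        have hm' : 1 ≤ divOutB (m.toNat + 1) m d :=
          divOutB_pos (m.toNat + 1) m d (by omega) h2
        have hle : divOutB (m.toNat + 1) m d ≤ m := divOutB_le (m.toNat + 1) m d h1 h2
        have hnd : ¬ d ∣ divOutB (m.toNat + 1) m d :=
          divOutB_not_dvd (m.toNat + 1) m d (by omega) h1 h2
        have hdvd' : divOutB (m.toNat + 1) m d ∣ m := divOutB_dvd (m.toNat + 1) m d h1 h2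
        have hmin' : ∀ k : Int, 2 ≤ k → k < d + 1 → ¬ k ∣ divOutB (m.toNat + 1) m d := by
          intro k hk1 hk2 hk3
          by_cases hkd : k = d
          · exact hnd (hkd ▸ hk3)
          · exact h4 k hk1 (by omega) (hk3.trans hdvd')
        have hpf := divOutB_pf (m.toNat + 1) m d (by omega) h1 h2 hpN
        have hmem : d.toNat ∈ m.toNat.primeFactors :=
          Nat.mem_primeFactors.mpr ⟨hpN, hdN, by omega⟩
        rw [ih (divOutB (m.toNat + 1) m d) (d + 1) (cnt + 1) (by omega) hm' (by omega) hmin']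
        rw [hpf, Finset.sdiff_singleton_eq_erase, Finset.card_erase_of_mem hmem]
        have hcp : 1 ≤ m.toNat.primeFactors.card := Finset.card_pos.mpr ⟨_, hmem⟩
        omega
      · rw [if_neg hmod]
        exact ih m (d + 1) cnt (by omega) h1 (by omega) (fun k hk1 hk2 hk3 => by
          by_cases hkd : k = d
          · exact hmod ((PySem.Int.mod_eq_zero_iff_dvd m d).mpr (hkd ▸ hk3))
          · exact h4 k hk1 (by omega) hk3)
    · rw [if_neg hg]
      have hdd : m < d * d := lt_of_not_ge hg
      by_cases hm1 : 1 < m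
      · have hprime : m.toNat.Prime := by
          by_contra hnp
          have hq1 : m.toNat.minFac.Prime := Nat.minFac_prime (by omega)
          have hq2 : m.toNat.minFac ∣ m.toNat := Nat.minFac_dvd _
          have hq4 : ¬ m.toNat.minFac < d.toNat := by
            intro hlt
            exact h4 (m.toNat.minFac : Int) (by exact_mod_cast hq1.two_le) (by omega)
              ((int_dvd_toNat _ _ (by positivity) (by omega)).mpr (by simpa using hq2))
          have hsq := Nat.minFac_sq_le_self (n := m.toNat) (by omega) hnp
          have h5 : (m.toNat : Int) < (d.toNat : Int) * (d.toNat : Int) := by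
            rw [Int.toNat_of_nonneg (by omega : (0:Int) ≤ m),
              Int.toNat_of_nonneg (by omega : (0:Int) ≤ d)]
            exact hdd
          have hdd' : m.toNat < d.toNat * d.toNat := by exact_mod_cast h5
          have h6 : d.toNat * d.toNat ≤ m.toNat.minFac * m.toNat.minFac :=
            Nat.mul_le_mul (by omega) (by omega)
          have h7 : m.toNat.minFac ^ 2 = m.toNat.minFac * m.toNat.minFac := sq _
          omega
        simp only [if_pos hm1, hprime.primeFactors]
        simp
      · have hm1' : m = 1 := by omega
        subst hm1'
        norm_num

lemma omegaB_char (p : Int) (hp : 1 < p) : omegaB p = (p.toNat.primeFactors.card : Int) := by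
  have h := omegaLoopB_spec ((p - 2).toNat + 1) p 2 0 (by omega) (by omega) (by omega)
    (fun k hk1 hk2 => absurd hk1 (by omega))
  simp only [omegaB]
  by_cases hr : 1 < (omegaLoopB ((p - 2).toNat + 1) p 2 0).1
  · rw [if_pos hr]
    rw [if_pos hr] at h
    omega
  · rw [if_neg hr]
    rw [if_neg hr] at h
    omega

lemma point_eq (bok p : Int) :
    (if czy2czynnikiA p then some bok else (none : Option Int))
      = (if 1 < p ∧ omegaB p = 2 then some bok else none) := by
  by_cases hp : 1 < p
  · by_cases hc : p.toNat.primeFactors.card = 2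
    · rw [if_pos ((czyA_char p).mpr ⟨hp, hc⟩),
        if_pos ⟨hp, by rw [omegaB_char p hp]; exact_mod_cast hc⟩]
    · have hA : ¬ (czy2czynnikiA p = true) := fun hA => hc ((czyA_char p).mp hA).2
      have hB : ¬ (1 < p ∧ omegaB p = 2) := by
        rintro ⟨_, h2⟩
        rw [omegaB_char p hp] at h2
        exact hc (by exact_mod_cast h2)
      rw [if_neg hA, if_neg hB]
  · have hA : ¬ (czy2czynnikiA p = true) := fun hA => hp ((czyA_char p).mp hA).1
    rw [if_neg hA, if_neg (fun hB => hp hB.1)]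

lemma findSome?_congr {α β : Type} (l : List α) (f g : α → Option β)
    (h : ∀ x ∈ l, f x = g x) : l.findSome? f = l.findSome? g := by
  induction l with
  | nil => rfl
  | cons a l ih =>
    rw [List.findSome?_cons, List.findSome?_cons, h a (List.mem_cons_self ..),
      ih (fun x hx => h x (List.mem_cons_of_mem _ hx))]

theorem main_eq (t : List (List Int)) : szukanieKwadratu t = szukanieKwadratu_alt t := by
  unfold szukanieKwadratu szukanieKwadratu_alt
  dsimp only
  congr 1
  apply findSome?_congr
  intro bok hbok
  rw [PySem.List.mem_pyRange_one] at hbok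
  apply findSome?_congr
  intro i hi
  rw [PySem.List.mem_pyRange_one] at hi
  apply findSome?_congr
  intro j hj
  rw [PySem.List.mem_pyRange_one] at hj
  unfold conditionA
  dsimp only
  rw [if_pos (by omega : i + bok - 1 < ((t.headI.length : Nat) : Int) ∧ j + bok - 1 < ((t.headI.length : Nat) : Int))]
  exact point_eq bok _

-- ===== VERDICT (by name: the statement is the Claim_ definition above) =====
theorem szukanieKwadratu_spec : Claim_equal_szukanieKwadratu := by
  intro t _ _
  unfold Spec_szukanieKwadratu
  exact main_eq t
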